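-- pv_equiv track=rewrite | github.com/enjoy-digital/litex | migen/bus/memory.py | _byte_mask
-- ===== SOURCE A (Python) =====
-- def _byte_mask(orig, dat_w, sel):
-- 	r = 0
-- 	shift = 0
-- 	while sel:
-- 		if sel & 1:
-- 			r |= (dat_w & 0xff) << shift
-- 		else:
-- 			r |= (orig & 0xff) << shift
-- 		orig >>= 8
-- 		dat_w >>= 8
-- 		sel >>= 1
-- 		shift += 8
-- 	return r
-- ===== SOURCE B (Python) =====
-- def _byte_mask(orig, dat_w, sel):
--     n = sel.bit_length()
--     mask = 0
--     for i in range(n):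
--         if (sel >> i) & 1:
--             mask |= 0xff << (8 * i)
--     full = (1 << (8 * n)) - 1
--     return (dat_w & mask) | (orig & (full ^ mask))
-- ===== Notes on version B (the rewrite author's own statement) =====
-- stated objective: alternative
-- what changed: Replaces A's per-byte interleaved select-shift-accumulate loop (which shifts orig/dat_w/sel in lockstep and assembles the result byte by byte) by a mask-construction phase (OR of 0xff<<8i for each set select bit) followed by a single branchless bitwise combine (dat_w & mask) | (orig & (full ^ mask)).
import Mathlib
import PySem

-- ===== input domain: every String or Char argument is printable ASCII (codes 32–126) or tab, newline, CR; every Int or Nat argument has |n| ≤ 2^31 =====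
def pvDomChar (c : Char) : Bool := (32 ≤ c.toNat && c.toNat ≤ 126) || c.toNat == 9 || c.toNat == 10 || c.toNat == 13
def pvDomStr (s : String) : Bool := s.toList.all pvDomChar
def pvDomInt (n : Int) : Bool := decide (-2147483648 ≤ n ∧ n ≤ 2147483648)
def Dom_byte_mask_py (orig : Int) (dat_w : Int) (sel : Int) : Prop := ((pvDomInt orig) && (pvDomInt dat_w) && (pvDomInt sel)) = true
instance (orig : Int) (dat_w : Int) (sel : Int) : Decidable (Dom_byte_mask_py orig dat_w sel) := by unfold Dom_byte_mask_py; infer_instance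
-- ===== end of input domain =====

-- B replaces A's per-byte interleaved select-shift-accumulate loop by a mask-construction
-- phase plus one branchless bitwise combine (equal cost; a different decomposition).

-- ===== PORT A =====
-- A's while-loop over (orig, dat_w, sel, r, shift).  Python's `sel` is consumed bit by bit;
-- it is tracked here as a Nat: Pre_ requires 0 ≤ sel (on sel < 0 the Python loop never
-- terminates), and on 0 ≤ sel Int.toNat is the identity.  `shift` is Python's nonnegative
-- shift counter (0, 8, 16, …).
def byteMaskLoopA (orig : Int) (dat_w : Int) (sel : Nat) (r : Int) (shift : Nat) : Int :=
  if h : sel = 0 then r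
  else
    byteMaskLoopA (orig >>> (8:Nat)) (dat_w >>> (8:Nat)) (sel >>> 1)
      (if sel &&& 1 = 1 then PySem.Int.bor r ((PySem.Int.band dat_w 255) <<< shift)
       else PySem.Int.bor r ((PySem.Int.band orig 255) <<< shift))
      (shift + 8)
  termination_by sel
  decreasing_by simp [Nat.shiftRight_one]; omega

def byte_mask_py (orig : Int) (dat_w : Int) (sel : Int) : Int :=
  byteMaskLoopA orig dat_w sel.toNat 0 0

-- ===== PORT B =====
-- Source B's mask-construction loop: `for i in range(n): if (sel >> i) & 1: mask |= 0xff << (8*i)`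
def byteMaskMaskB (sel : Int) (n : Nat) : Int :=
  (List.range n).foldl
    (fun (m : Int) (i : Nat) => if PySem.Int.band (sel >>> i) 1 = 1 then PySem.Int.bor m ((255 : Int) <<< (8 * i)) else m) 0

def byte_mask_py_alt (orig : Int) (dat_w : Int) (sel : Int) : Int :=
  let n := PySem.Int.bitLength sel
  let mask := byteMaskMaskB sel n
  let full := (1 : Int) <<< (8 * n) - 1
  PySem.Int.bor (PySem.Int.band dat_w mask) (PySem.Int.band orig (PySem.Int.bxor full mask))

-- ===== PRECONDITION & SPEC =====
-- Pre_ excludes sel < 0, on which Python A's `while sel` loop never terminates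
-- (sel >>= 1 stabilises at -1); A returns no value there.
def Pre_byte_mask_py (orig : Int) (dat_w : Int) (sel : Int) : Prop := 0 ≤ sel
instance (orig : Int) (dat_w : Int) (sel : Int) : Decidable (Pre_byte_mask_py orig dat_w sel) := by unfold Pre_byte_mask_py; infer_instance
def pvWitness_byte_mask_py : Int × Int × Int := (5, 300, 2)

def Spec_byte_mask_py (orig : Int) (dat_w : Int) (sel : Int) (out : Int) : Prop := out = byte_mask_py_alt orig dat_w sel
instance (orig : Int) (dat_w : Int) (sel : Int) (out : Int) : Decidable (Spec_byte_mask_py orig dat_w sel out) := by unfold Spec_byte_mask_py; infer_instance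

-- ===== CLAIM (what is proved, stated in full; the proofs are below) =====
def Claim_equal_byte_mask_py : Prop := ∀ (orig : Int) (dat_w : Int) (sel : Int), Dom_byte_mask_py orig dat_w sel → Pre_byte_mask_py orig dat_w sel → Spec_byte_mask_py orig dat_w sel (byte_mask_py orig dat_w sel)

-- ===== LEMMAS AND PROOFS =====

-- ---- Nat bit toolkit ----

-- disjoint OR is addition
lemma nat_add_of_and_eq_zero : ∀ x y : Nat, x &&& y = 0 → x + y = x ||| y := by
  intro x
  induction x using Nat.strong_induction_on with
  | _ x ih =>
    intro y h
    rcases Nat.eq_zero_or_pos x with h0 | hpos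
    · subst h0; simp
    · have hd : x / 2 &&& y / 2 = 0 := by
        rw [← Nat.and_div_two, h]
      have ihd := ih (x / 2) (Nat.div_lt_self hpos (by norm_num)) (y / 2) hd
      have hor2 : (x ||| y) / 2 = x / 2 ||| y / 2 := Nat.or_div_two
      have hb : ¬ (x % 2 = 1 ∧ y % 2 = 1) := by
        rintro ⟨ha, hbb⟩
        have hc := congrArg (fun z => Nat.testBit z 0) h
        simp [Nat.testBit_and, Nat.testBit_zero, ha, hbb] at hc
      have hbo : (x ||| y) % 2 = 1 ↔ (x % 2 = 1 ∨ y % 2 = 1) := by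
        have hc := Nat.testBit_or x y 0
        simp only [Nat.testBit_zero] at hc
        constructor
        · intro hh
          have : (decide (x % 2 = 1) || decide (y % 2 = 1)) = true := by rw [← hc]; simp [hh]
          rcases Bool.or_eq_true_iff.mp this with h' | h' <;> simp at h' <;> [exact Or.inl h'; exact Or.inr h']
        · intro hh
          have : (decide (x % 2 = 1) || decide (y % 2 = 1)) = true := by
            rcases hh with h' | h' <;> simp [h']
          rw [← hc] at this
          simpa using this
      have hq := Nat.mod_two_eq_zero_or_one (x ||| y)
      rcases Nat.mod_two_eq_zero_or_one x with hx2 | hx2 <;>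
        rcases Nat.mod_two_eq_zero_or_one y with hy2 | hy2
      · have hno : (x ||| y) % 2 ≠ 1 := by
          intro hh
          rcases hbo.mp hh with h' | h' <;> omega
        omega
      · have hyes : (x ||| y) % 2 = 1 := hbo.mpr (Or.inr hy2)
        omega
      · have hyes : (x ||| y) % 2 = 1 := hbo.mpr (Or.inl hx2)
        omega
      · exact absurd ⟨hx2, hy2⟩ hb

lemma nat_sub_and_eq_ldiff (n y : Nat) : n - (n &&& y) = Nat.ldiff n y := by
  have h0 : (Nat.ldiff n y) &&& (n &&& y) = 0 := by
    apply Nat.eq_of_testBit_eq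
    intro i
    simp only [Nat.testBit_and, Nat.testBit_ldiff, Nat.zero_testBit]
    cases n.testBit i <;> cases y.testBit i <;> simp
  have h1 : (Nat.ldiff n y) ||| (n &&& y) = n := by
    apply Nat.eq_of_testBit_eq
    intro i
    simp only [Nat.testBit_or, Nat.testBit_and, Nat.testBit_ldiff]
    cases n.testBit i <;> cases y.testBit i <;> simp
  have h2 := nat_add_of_and_eq_zero (Nat.ldiff n y) (n &&& y) h0
  omega

-- ---- Int testBit toolkit ----

lemma tb_natCast (m k : Nat) : ((m : Int)).testBit k = m.testBit k := rfl

lemma tb_zero (k : Nat) : (0 : Int).testBit k = false := by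
  rw [show (0 : Int) = ((0 : Nat) : Int) from rfl, tb_natCast, Nat.zero_testBit]

lemma tb_toNat (x : Int) (hx : 0 ≤ x) (k : Nat) : x.toNat.testBit k = x.testBit k := by
  obtain ⟨m, rfl⟩ := Int.eq_ofNat_of_zero_le hx
  simp [tb_natCast]

lemma int_testBit_ext (a b : Int) (h : ∀ k, a.testBit k = b.testBit k) : a = b := by
  cases a with
  | ofNat m =>
    cases b with
    | ofNat n =>
      have : m = n := Nat.eq_of_testBit_eq h
      simp [this]
    | negSucc n =>
      exfalso
      have hk := h (max m.size n.size)
      have hm : m.testBit (max m.size n.size) = false :=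
        Nat.testBit_eq_false_of_lt (lt_of_lt_of_le (Nat.lt_size_self m)
          (Nat.pow_le_pow_right (by norm_num) (le_max_left _ _)))
      have hn : n.testBit (max m.size n.size) = false :=
        Nat.testBit_eq_false_of_lt (lt_of_lt_of_le (Nat.lt_size_self n)
          (Nat.pow_le_pow_right (by norm_num) (le_max_right _ _)))
      rw [show (Int.ofNat m).testBit _ = m.testBit _ from rfl] at hk
      rw [show (Int.negSucc n).testBit _ = !n.testBit _ from rfl] at hk
      rw [hm, hn] at hk
      simp at hk
  | negSucc m =>
    cases b with
    | ofNat n =>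
      exfalso
      have hk := h (max m.size n.size)
      have hm : m.testBit (max m.size n.size) = false :=
        Nat.testBit_eq_false_of_lt (lt_of_lt_of_le (Nat.lt_size_self m)
          (Nat.pow_le_pow_right (by norm_num) (le_max_left _ _)))
      have hn : n.testBit (max m.size n.size) = false :=
        Nat.testBit_eq_false_of_lt (lt_of_lt_of_le (Nat.lt_size_self n)
          (Nat.pow_le_pow_right (by norm_num) (le_max_right _ _)))
      rw [show (Int.negSucc m).testBit _ = !m.testBit _ from rfl] at hk
      rw [show (Int.ofNat n).testBit _ = n.testBit _ from rfl] at hk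
      rw [hm, hn] at hk
      simp at hk
    | negSucc n =>
      have : m = n := by
        apply Nat.eq_of_testBit_eq
        intro i
        have hi := h i
        rw [show (Int.negSucc m).testBit i = !m.testBit i from rfl,
            show (Int.negSucc n).testBit i = !n.testBit i from rfl] at hi
        cases hm : m.testBit i <;> cases hn : n.testBit i <;> simp [hm, hn] at hi ⊢
      simp [this]

lemma tb_band (a b : Int) (hb : 0 ≤ b) (k : Nat) :
    (PySem.Int.band a b).testBit k = (a.testBit k && b.testBit k) := by
  obtain ⟨n, rfl⟩ := Int.eq_ofNat_of_zero_le hb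
  cases a with
  | ofNat m =>
    rw [PySem.Int.band_of_nonneg (by exact Int.natCast_nonneg m) hb]
    simp [tb_natCast, Nat.testBit_and]
  | negSucc m =>
    have hneg : ¬ (0 : Int) ≤ Int.negSucc m := by
      rw [Int.negSucc_eq]
      omega
    have hstep : PySem.Int.band (Int.negSucc m) ((n : Nat) : Int)
        = (((((n : Nat) : Int)).toNat - ((((n : Nat) : Int)).toNat &&& (-(Int.negSucc m) - 1).toNat) : Nat) : Int) := by
      rw [PySem.Int.band]
      simp [hneg, hb]
    have harg : (-(Int.negSucc m) - 1) = ((m : Nat) : Int) := by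
      rw [Int.negSucc_eq]; ring
    rw [hstep, harg, Int.toNat_natCast, Int.toNat_natCast, nat_sub_and_eq_ldiff,
        tb_natCast, Nat.testBit_ldiff]
    rw [show (Int.negSucc m).testBit k = !m.testBit k from rfl, tb_natCast]
    rw [Bool.and_comm]

lemma tb_bor (a b : Int) (ha : 0 ≤ a) (hb : 0 ≤ b) (k : Nat) :
    (PySem.Int.bor a b).testBit k = (a.testBit k || b.testBit k) := by
  obtain ⟨m, rfl⟩ := Int.eq_ofNat_of_zero_le ha
  obtain ⟨n, rfl⟩ := Int.eq_ofNat_of_zero_le hb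
  rw [PySem.Int.bor_of_nonneg ha hb]
  simp [tb_natCast, Nat.testBit_or]

lemma tb_bxor (a b : Int) (ha : 0 ≤ a) (hb : 0 ≤ b) (k : Nat) :
    (PySem.Int.bxor a b).testBit k = (a.testBit k ^^ b.testBit k) := by
  obtain ⟨m, rfl⟩ := Int.eq_ofNat_of_zero_le ha
  obtain ⟨n, rfl⟩ := Int.eq_ofNat_of_zero_le hb
  rw [PySem.Int.bxor_of_nonneg ha hb]
  simp [tb_natCast, Nat.testBit_xor]

lemma tb_shr (x : Int) (n k : Nat) : (x >>> n).testBit k = x.testBit (n + k) := by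
  cases x with
  | ofNat m =>
    show (m >>> n).testBit k = m.testBit (n + k)
    exact Nat.testBit_shiftRight m
  | negSucc m =>
    show (!(m >>> n).testBit k) = !m.testBit (n + k)
    rw [Nat.testBit_shiftRight]

lemma shl_natCast (m n : Nat) : ((m : Int) <<< n : Int) = ((m <<< n : Nat) : Int) := rfl

lemma tb_255 (k : Nat) : ((255 : Int)).testBit k = decide (k < 8) := by
  rw [show ((255 : Int)) = ((255 : Nat) : Int) from rfl, tb_natCast,
      show (255 : Nat) = 2 ^ 8 - 1 from rfl, Nat.testBit_two_pow_sub_one]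

lemma band_nonneg_right (a b : Int) (hb : 0 ≤ b) : 0 ≤ PySem.Int.band a b := by
  rw [PySem.Int.band_comm]; exact PySem.Int.band_nonneg_of_nonneg_left a hb

-- ---- A-side characterisation ----

-- the value A's loop accumulates (as a Nat), structured exactly as the loop consumes its state
def coreN (orig : Int) (dat_w : Int) (sel : Nat) : Nat :=
  if h : sel = 0 then 0
  else ((if sel &&& 1 = 1 then PySem.Int.band dat_w 255 else PySem.Int.band orig 255).toNat)
        ||| (coreN (orig >>> (8:Nat)) (dat_w >>> (8:Nat)) (sel >>> 1)) <<< 8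
  termination_by sel
  decreasing_by simp [Nat.shiftRight_one]; omega

lemma nat_or_shl (a b n : Nat) : (a ||| b) <<< n = a <<< n ||| b <<< n := by
  apply Nat.eq_of_testBit_eq
  intro k
  simp [Nat.testBit_shiftLeft, Nat.testBit_or, Bool.and_or_distrib_left]

lemma aLoop_eq : ∀ (sel : Nat) (orig dat_w : Int) (rn shift : Nat),
    byteMaskLoopA orig dat_w sel ((rn : Nat) : Int) shift = ((rn ||| (coreN orig dat_w sel) <<< shift : Nat) : Int) := by
  intro sel
  induction sel using Nat.strong_induction_on with
  | _ s ih =>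
    intro orig dat_w rn shift
    rw [byteMaskLoopA, coreN]
    by_cases h : s = 0
    · simp [h]
    · rw [dif_neg h, dif_neg h]
      have hlt : s >>> 1 < s := by simp [Nat.shiftRight_one]; omega
      have hb : ∀ x : Int, PySem.Int.bor ((rn : Nat) : Int) ((PySem.Int.band x 255) <<< shift)
          = ((rn ||| (PySem.Int.band x 255).toNat <<< shift : Nat) : Int) := by
        intro x
        have hnn : 0 ≤ PySem.Int.band x 255 := band_nonneg_right x 255 (by norm_num)
        obtain ⟨bn, hbn⟩ := Int.eq_ofNat_of_zero_le hnn
        rw [hbn, shl_natCast, PySem.Int.bor_of_nonneg (Int.natCast_nonneg rn) (Int.natCast_nonneg _)]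
        simp [hbn]
        rw [shl_natCast, Int.toNat_natCast]
      by_cases hsel : s &&& 1 = 1
      · rw [if_pos hsel, if_pos hsel, hb dat_w, ih (s >>> 1) hlt]
        congr 1
        rw [nat_or_shl, ← Nat.shiftLeft_add, Nat.add_comm 8 shift, Nat.lor_assoc]
      · rw [if_neg hsel, if_neg hsel, hb orig, ih (s >>> 1) hlt]
        congr 1
        rw [nat_or_shl, ← Nat.shiftLeft_add, Nat.add_comm 8 shift, Nat.lor_assoc]

lemma coreN_tb : ∀ (sel : Nat) (orig dat_w : Int) (j : Nat),
    (coreN orig dat_w sel).testBit j =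
      (decide (2 ^ (j / 8) ≤ sel) && (if sel.testBit (j / 8) then dat_w.testBit j else orig.testBit j)) := by
  intro sel
  induction sel using Nat.strong_induction_on with
  | _ s ih =>
    intro orig dat_w j
    rw [coreN]
    by_cases h : s = 0
    · simp [h, Nat.zero_testBit]
    · rw [dif_neg h]
      have hlt : s >>> 1 < s := by simp [Nat.shiftRight_one]; omega
      have h1 : (1 : Nat) ≤ s := by omega
      have hts : s.testBit 0 = decide (s &&& 1 = 1) := by
        rw [Nat.and_one_is_mod, Nat.testBit_zero]
      rw [Nat.testBit_or, Nat.testBit_shiftLeft]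
      by_cases hj : j < 8
      · have hj8 : j / 8 = 0 := by omega
        have hdec : decide (8 ≤ j) = false := by simp; omega
        have hb : ∀ x : Int, (PySem.Int.band x 255).toNat.testBit j = x.testBit j := by
          intro x
          rw [tb_toNat _ (band_nonneg_right x 255 (by norm_num)),
              tb_band x 255 (by norm_num), tb_255]
          simp [hj]
        rw [hdec, hj8, hts]
        by_cases hsel : s &&& 1 = 1
        · rw [if_pos hsel, hb]
          rw [Nat.and_one_is_mod] at hsel
          simp [hsel, h1]
        · rw [if_neg hsel, hb]
          rw [Nat.and_one_is_mod] at hsel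
          simp [hsel, h1]
      · have hdec : decide (8 ≤ j) = true := by simp; omega
        have hbf : ∀ x : Int, (PySem.Int.band x 255).toNat.testBit j = false := by
          intro x
          rw [tb_toNat _ (band_nonneg_right x 255 (by norm_num)),
              tb_band x 255 (by norm_num), tb_255]
          simp; omega
        have hih := ih (s >>> 1) hlt (orig >>> (8:Nat)) (dat_w >>> (8:Nat)) (j - 8)
        have hdiv : (j - 8) / 8 = j / 8 - 1 := by omega
        have hj1 : 1 ≤ j / 8 := by omega
        have hpow : decide (2 ^ (j / 8 - 1) ≤ s >>> 1) = decide (2 ^ (j / 8) ≤ s) := by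
          have : (2 ^ (j / 8 - 1) ≤ s >>> 1) ↔ (2 ^ (j / 8) ≤ s) := by
            rw [Nat.shiftRight_one, Nat.le_div_iff_mul_le (by norm_num)]
            have h2 : 2 ^ (j / 8 - 1) * 2 = 2 ^ (j / 8) := by
              rw [← pow_succ]
              congr 1
              omega
            rw [h2]
          simp [this]
        have htbit : (s >>> 1).testBit (j / 8 - 1) = s.testBit (j / 8) := by
          rw [Nat.shiftRight_one, Nat.testBit_div_two]
          congr 1
          omega
        have htd : (dat_w >>> (8:Nat)).testBit (j - 8) = dat_w.testBit j := by
          rw [tb_shr]; congr 1; omega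
        have hto : (orig >>> (8:Nat)).testBit (j - 8) = orig.testBit j := by
          rw [tb_shr]; congr 1; omega
        have hzero : (if s &&& 1 = 1 then PySem.Int.band dat_w 255 else PySem.Int.band orig 255).toNat.testBit j = false := by
          split <;> exact hbf _
        rw [hdec, hih, hdiv, hpow, htbit, htd, hto, hzero]
        simp only [Bool.false_or, Bool.true_and]

-- ---- B-side characterisation ----

lemma maskB_nonneg (sel : Int) (n : Nat) : 0 ≤ byteMaskMaskB sel n := by
  unfold byteMaskMaskB
  have key : ∀ (l : List Nat) (m : Int), 0 ≤ m →
      0 ≤ l.foldl (fun (m : Int) (i : Nat) => if PySem.Int.band (sel >>> i) 1 = 1 then PySem.Int.bor m ((255 : Int) <<< (8 * i)) else m) m := by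
    intro l
    induction l with
    | nil => intro m hm; exact hm
    | cons i t iht =>
      intro m hm
      simp only [List.foldl_cons]
      apply iht
      by_cases hc : PySem.Int.band (sel >>> i) 1 = 1
      · rw [if_pos hc]
        obtain ⟨mn, hmn⟩ := Int.eq_ofNat_of_zero_le hm
        rw [hmn, show ((255:Int) <<< (8*i) : Int) = (((255 <<< (8*i) : Nat)) : Int) from rfl,
            PySem.Int.bor_of_nonneg (Int.natCast_nonneg _) (Int.natCast_nonneg _)]
        exact Int.natCast_nonneg _
      · rwa [if_neg hc]
  exact key _ 0 le_rfl

lemma maskB_cond (selN i : Nat) : (PySem.Int.band (((selN : Nat) : Int) >>> i) 1 = 1) ↔ selN.testBit i = true := by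
  rw [show (((selN : Nat) : Int) >>> i) = ((selN >>> i : Nat) : Int) from rfl,
      show (1 : Int) = ((1 : Nat) : Int) from rfl, PySem.Int.band_natCast]
  rw [Nat.and_one_is_mod]
  constructor
  · intro h
    have hn : selN >>> i % 2 = 1 := by exact_mod_cast h
    rw [Nat.testBit, Nat.one_and_eq_mod_two, hn]
    rfl
  · intro h
    rw [Nat.testBit, Nat.one_and_eq_mod_two] at h
    have : selN >>> i % 2 = 1 := by
      rcases Nat.mod_two_eq_zero_or_one (selN >>> i) with h0 | h0
      · rw [h0] at h; simp at h
      · exact h0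
    exact_mod_cast this

lemma maskB_tb (selN : Nat) : ∀ (n k : Nat),
    (byteMaskMaskB ((selN : Nat) : Int) n).testBit k = (decide (k / 8 < n) && selN.testBit (k / 8)) := by
  intro n
  induction n with
  | zero =>
    intro k
    simp [byteMaskMaskB, tb_zero]
  | succ n ihn =>
    intro k
    have hstep : byteMaskMaskB ((selN : Nat) : Int) (n + 1)
        = (fun (m : Int) (i : Nat) => if PySem.Int.band (((selN : Nat) : Int) >>> i) 1 = 1 then PySem.Int.bor m ((255 : Int) <<< (8 * i)) else m)
            (byteMaskMaskB ((selN : Nat) : Int) n) n := by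
      unfold byteMaskMaskB
      rw [List.range_succ, List.foldl_append]
      rfl
    simp only [hstep]
    by_cases hc : PySem.Int.band (((selN : Nat) : Int) >>> n) 1 = 1
    · have hsel : selN.testBit n = true := (maskB_cond selN n).mp hc
      rw [if_pos hc]
      rw [tb_bor _ _ (maskB_nonneg _ _) (by
            rw [show ((255:Int) <<< (8*n) : Int) = (((255 <<< (8*n) : Nat)) : Int) from rfl]
            exact Int.natCast_nonneg _) k]
      rw [ihn k,
          show ((255:Int) <<< (8*n) : Int) = (((255 <<< (8*n) : Nat)) : Int) from rfl, tb_natCast,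
          Nat.testBit_shiftLeft, show (255 : Nat) = 2 ^ 8 - 1 from rfl, Nat.testBit_two_pow_sub_one]
      rcases Nat.lt_trichotomy (k / 8) n with hk | hk | hk
      · have e1 : decide (k / 8 < n) = true := by simp [hk]
        have e2 : decide (k / 8 < n + 1) = true := by simp; omega
        have e3 : decide (8 * n ≤ k) = false := by simp; omega
        rw [e1, e2, e3]
        simp
      · rw [hk]
        have e3 : decide (8 * n ≤ k) = true := by simp; omega
        have e4 : decide (k - 8 * n < 8) = true := by simp; omega
        have e2 : decide (n < n + 1) = true := by simp
        rw [e3, e4, e2, hsel]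
        simp
      · have e1 : decide (k / 8 < n) = false := by simp; omega
        have e2 : decide (k / 8 < n + 1) = false := by simp; omega
        have e34 : (decide (8 * n ≤ k) && decide (k - 8 * n < 8)) = false := by
          rcases Nat.lt_or_ge k (8 * n) with hlt | hge
          · have e : decide (8 * n ≤ k) = false := by simp; omega
            rw [e, Bool.false_and]
          · have e : decide (k - 8 * n < 8) = false := by simp; omega
            rw [e, Bool.and_false]
        rw [e1, e2, e34]
        simp
    · have hsel : selN.testBit n = false := by
        cases hsb : selN.testBit n
        · rfl
        · exact absurd ((maskB_cond selN n).mpr hsb) hc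
      rw [if_neg hc, ihn k]
      rcases Nat.lt_trichotomy (k / 8) n with hk | hk | hk
      · have e1 : decide (k / 8 < n) = true := by simp [hk]
        have e2 : decide (k / 8 < n + 1) = true := by simp; omega
        rw [e1, e2]
      · rw [hk, hsel]
        simp
      · have e1 : decide (k / 8 < n) = false := by simp; omega
        have e2 : decide (k / 8 < n + 1) = false := by simp; omega
        rw [e1, e2]

lemma full_eq (n : Nat) : ((1 : Int) <<< (8 * n) - 1 : Int) = ((2 ^ (8 * n) - 1 : Nat) : Int) := by
  rw [show ((1:Int) <<< (8*n) : Int) = (((1 <<< (8*n) : Nat)) : Int) from rfl]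
  rw [Nat.one_shiftLeft]
  rw [Int.ofNat_sub (Nat.one_le_two_pow)]
  rfl

lemma lt_bitLength_iff (selN i : Nat) : i < PySem.Int.bitLength ((selN : Nat) : Int) ↔ 2 ^ i ≤ selN := by
  constructor
  · intro h
    have hne : ((selN : Nat) : Int) ≠ 0 := by
      intro h0
      rw [h0, PySem.Int.bitLength_zero] at h
      omega
    have h2 := PySem.Int.two_pow_bitLength_le ((selN : Nat) : Int) hne
    have hab : (((selN : Nat) : Int)).natAbs = selN := Int.natAbs_natCast selN
    rw [hab] at h2
    calc 2 ^ i ≤ 2 ^ (PySem.Int.bitLength ((selN : Nat) : Int) - 1) :=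
          Nat.pow_le_pow_right (by norm_num) (by omega)
      _ ≤ selN := h2
  · intro h
    have h1 := PySem.Int.lt_two_pow_bitLength ((selN : Nat) : Int)
    have hab : (((selN : Nat) : Int)).natAbs = selN := Int.natAbs_natCast selN
    rw [hab] at h1
    by_contra hc
    push_neg at hc
    have : 2 ^ PySem.Int.bitLength ((selN : Nat) : Int) ≤ 2 ^ i :=
      Nat.pow_le_pow_right (by norm_num) hc
    omega

-- ===== VERDICT (by name: the statement is the Claim_ definition above) =====
theorem byte_mask_py_spec : Claim_equal_byte_mask_py := by
  intro orig dat_w sel _hdom hpre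
  unfold Spec_byte_mask_py
  obtain ⟨selN, rfl⟩ := Int.eq_ofNat_of_zero_le hpre
  have hA : byte_mask_py orig dat_w ((selN : Nat) : Int) = ((coreN orig dat_w selN : Nat) : Int) := by
    unfold byte_mask_py
    rw [Int.toNat_natCast]
    have := aLoop_eq selN orig dat_w 0 0
    rw [show ((0 : Nat) : Int) = (0 : Int) from rfl] at this
    rw [this]
    simp
  rw [hA]
  unfold byte_mask_py_alt
  apply int_testBit_ext
  intro k
  set n := PySem.Int.bitLength ((selN : Nat) : Int) with hn
  have hmasknn := maskB_nonneg ((selN : Nat) : Int) n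
  have hfullnn : (0 : Int) ≤ (1 : Int) <<< (8 * n) - 1 := by
    rw [full_eq]; exact Int.ofNat_nonneg _
  have hxornn : 0 ≤ PySem.Int.bxor ((1 : Int) <<< (8 * n) - 1) (byteMaskMaskB ((selN : Nat) : Int) n) := by
    obtain ⟨fn, hfn⟩ := Int.eq_ofNat_of_zero_le hfullnn
    obtain ⟨mn, hmn⟩ := Int.eq_ofNat_of_zero_le hmasknn
    rw [hfn, hmn, PySem.Int.bxor_natCast]
    exact Int.ofNat_nonneg _
  rw [tb_bor _ _ (band_nonneg_right _ _ hmasknn) (band_nonneg_right _ _ hxornn)]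
  rw [tb_band _ _ hmasknn, tb_band _ _ hxornn, tb_bxor _ _ hfullnn hmasknn]
  rw [full_eq, tb_natCast, tb_natCast, Nat.testBit_two_pow_sub_one]
  rw [maskB_tb]
  rw [coreN_tb]
  have hdiv : (k < 8 * n) ↔ (k / 8 < n) := by omega
  have hsz : (2 ^ (k / 8) ≤ selN) ↔ (k / 8 < n) := (lt_bitLength_iff selN (k / 8)).symm
  by_cases h1 : k / 8 < n <;> by_cases h2 : selN.testBit (k / 8) <;>
    simp [h1, h2, hdiv, hsz]
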